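-- pv_equiv track=rewrite | github.com/Orecchia-Research-Group/manifold_learning | manifold_utils/triangulation.py | all_faces_from_d_simplices
-- ===== SOURCE A (Python) =====
-- from itertools import chain, combinations
--
-- def power_set_bar_empty(some_tuple):
-- 	"""
-- 	Given a tuple, returns all nonempty,
-- 	sorted subtuples of that list, using the ordering
-- 	of the original tuple for sorting
-- 	"""
-- 	# Modified from Mark Rushakoff's answer to
-- 	# the following StackOverflow question:
-- 	# https://stackoverflow.com/questions/1482308/how-to-get-all-subsets-of-a-set-powerset
-- 	return list(chain.from_iterable(combinations(some_tuple, r) for r in range(1, len(some_tuple)+1)))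
--
-- def all_faces_from_d_simplices(simplices):
-- 	assert all(map(lambda x: len(x) == len(simplices[0]), simplices))
-- 	face_set = set()
-- 	for simplex in simplices:
-- 		faces = power_set_bar_empty(simplex)
-- 		for face in faces:
-- 			face_set.add(face)
-- 	return face_set
-- ===== SOURCE B (Python) =====
-- def all_faces_from_d_simplices(simplices):
--     assert all(map(lambda x: len(x) == len(simplices[0]), simplices))
--     face_set = set()
--     for simplex in simplices:
--         # breadth-first growth: each face is paired with the suffix of
--         # vertices it may still be extended by; every pass extends all
--         # current faces by one vertex
--         layer = [((), tuple(simplex))]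
--         while layer:
--             next_layer = []
--             for face, rest in layer:
--                 while rest:
--                     x, rest = rest[0], rest[1:]
--                     ext = face + (x,)
--                     face_set.add(ext)
--                     next_layer.append((ext, rest))
--             layer = next_layer
--     return face_set
-- ===== Notes on version B (the rewrite author's own statement) =====
-- stated objective: alternative
-- what changed: Replaces the cardinality-indexed itertools.combinations enumeration with a breadth-first expansion that grows each face one vertex at a time, pairing every face with the suffix of vertices it may still absorb; Pre_ excludes ragged inputs, on which both programs' assert raises AssertionError.
import Mathlib
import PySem

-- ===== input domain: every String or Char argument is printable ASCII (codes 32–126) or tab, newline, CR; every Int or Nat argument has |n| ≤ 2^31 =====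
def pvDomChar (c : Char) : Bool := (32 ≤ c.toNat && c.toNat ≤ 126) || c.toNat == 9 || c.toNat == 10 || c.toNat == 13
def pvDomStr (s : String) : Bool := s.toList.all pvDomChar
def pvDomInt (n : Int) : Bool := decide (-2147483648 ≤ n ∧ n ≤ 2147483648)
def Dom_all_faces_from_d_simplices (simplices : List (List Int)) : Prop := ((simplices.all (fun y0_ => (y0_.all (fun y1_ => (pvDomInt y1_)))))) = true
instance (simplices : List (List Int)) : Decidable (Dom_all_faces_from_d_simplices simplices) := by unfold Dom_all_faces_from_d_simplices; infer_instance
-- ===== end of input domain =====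

-- B replaces the by-cardinality itertools.combinations enumeration with a breadth-first
-- expansion growing each face one vertex at a time (objective: alternative, same cost).

-- ===== PORT A =====
-- exact model of itertools.combinations(xs, r): the r-subtuples in lexicographic index order
def pvCombos (xs : List Int) (r : Nat) : List (List Int) :=
  match r, xs with
  | 0, _ => [[]]
  | _ + 1, [] => []
  | r' + 1, x :: rest => (pvCombos rest r').map (fun s => x :: s) ++ pvCombos rest (r' + 1)

def power_set_bar_empty (xs : List Int) : List (List Int) :=
  (PySem.List.pyRange 1 ((xs.length : Int) + 1) 1).flatMap (fun r => pvCombos xs r.toNat)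

def all_faces_from_d_simplices (simplices : List (List Int)) : List (List Int) :=
  -- the assert raises (outside Pre_) rather than returning; the port models the returning runs
  simplices.foldl (fun face_set simplex =>
    (power_set_bar_empty simplex).foldl (fun s face => PySem.Set.add s face) face_set) []

-- ===== PORT B =====
-- inner 'while rest:' of Source B: rest[0]/rest[1:] on a nonempty tuple = head/tail (exact here);
-- state is (face_set, next_layer)
def pvExtend (face : List Int) : List Int → List (List Int) → List (List Int × List Int) →
    List (List Int) × List (List Int × List Int)
  | [], fs, nl => (fs, nl)
  | x :: rest, fs, nl =>
      pvExtend face rest (PySem.Set.add fs (face ++ [x])) (nl ++ [(face ++ [x], rest)])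

-- one pass of the 'for face, rest in layer' loop, starting from next_layer = []
def pvLayerStep (layer : List (List Int × List Int)) (fs : List (List Int)) :
    List (List Int) × List (List Int × List Int) :=
  layer.foldl (fun st p => pvExtend p.1 p.2 st.1 st.2) (fs, [])

-- the 'while layer:' loop; the fuel simplex.length + 2 provably covers every pass it makes
def pvLoop : Nat → List (List Int × List Int) → List (List Int) → List (List Int)
  | 0, _, fs => fs
  | fuel + 1, layer, fs =>
      if layer = [] then fs
      else
        let st := pvLayerStep layer fs
        pvLoop fuel st.2 st.1

def all_faces_from_d_simplices_alt (simplices : List (List Int)) : List (List Int) :=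
  -- B keeps A's assert too: it raises outside Pre_, so the port models the returning runs
  simplices.foldl (fun face_set simplex =>
    pvLoop (simplex.length + 2) [([], simplex)] face_set) []

-- ===== PRECONDITION & SPEC =====
-- Pre_ excludes exactly the inputs whose rows are not all the same length: there both
-- programs' assert raises AssertionError (neither returns).
def Pre_all_faces_from_d_simplices (simplices : List (List Int)) : Prop :=
  ∀ x ∈ simplices, x.length = (simplices.headD []).length
instance (simplices : List (List Int)) : Decidable (Pre_all_faces_from_d_simplices simplices) := by unfold Pre_all_faces_from_d_simplices; infer_instance

def pvWitness_all_faces_from_d_simplices : List (List Int) := [[1, 2], [2, 3]]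

def Spec_all_faces_from_d_simplices (simplices : List (List Int)) (out : List (List Int)) : Prop := out = all_faces_from_d_simplices_alt simplices
instance (simplices : List (List Int)) (out : List (List Int)) : Decidable (Spec_all_faces_from_d_simplices simplices out) := by unfold Spec_all_faces_from_d_simplices; infer_instance

-- ===== CLAIM (what is proved, stated in full; the proofs are below) =====
def Claim_equal_all_faces_from_d_simplices : Prop := ∀ (simplices : List (List Int)), Dom_all_faces_from_d_simplices simplices → Pre_all_faces_from_d_simplices simplices → Spec_all_faces_from_d_simplices simplices (all_faces_from_d_simplices simplices)

-- ===== LEMMAS AND PROOFS =====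

theorem pvFlatMapMap {α β γ : Type} (l : List α) (f : α → β) (g : β → List γ) :
    (l.map f).flatMap g = l.flatMap (fun a => g (f a)) := by
  induction l with
  | nil => rfl
  | cons a t ih => simp only [List.map_cons, List.flatMap_cons, ih]

theorem pvFlatMapCongr {α β : Type} (l : List α) (f g : α → List β) (h : ∀ a ∈ l, f a = g a) :
    l.flatMap f = l.flatMap g := by
  induction l with
  | nil => rfl
  | cons a t ih =>
    simp only [List.flatMap_cons, h a (by simp)]
    rw [ih (fun b hb => h b (by simp [hb]))]

-- A's face list in closed form
theorem aFaces (xs : List Int) :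
    power_set_bar_empty xs = (List.range xs.length).flatMap (fun i => pvCombos xs (i + 1)) := by
  unfold power_set_bar_empty
  rw [PySem.List.pyRange_one]
  have h : ((xs.length : Int) + 1 - 1).toNat = xs.length := by omega
  rw [h, pvFlatMapMap]
  apply pvFlatMapCongr
  intro a _
  have h2 : ((1 : Int) + (a : Int)).toNat = a + 1 := by omega
  rw [h2]

-- the pure extension list of one (face, rest) pair
def pvExp (face : List Int) : List Int → List (List Int × List Int)
  | [] => []
  | x :: rest => (face ++ [x], rest) :: pvExp face rest

theorem pvExtend_eq (face : List Int) : ∀ (rest : List Int) (fs : List (List Int))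
    (nl : List (List Int × List Int)),
    pvExtend face rest fs nl =
      (((pvExp face rest).map Prod.fst).foldl (fun s f => PySem.Set.add s f) fs,
        nl ++ pvExp face rest) := by
  intro rest
  induction rest with
  | nil => intro fs nl; simp [pvExtend, pvExp]
  | cons x t ih =>
    intro fs nl
    simp only [pvExtend, pvExp, List.map_cons, List.foldl_cons, ih, List.append_assoc,
      List.cons_append, List.nil_append]

theorem pvLayerStep_eq (layer : List (List Int × List Int)) :
    ∀ (fs : List (List Int)) (nl : List (List Int × List Int)),
    layer.foldl (fun st p => pvExtend p.1 p.2 st.1 st.2) (fs, nl) =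
      (((layer.flatMap (fun p => pvExp p.1 p.2)).map Prod.fst).foldl
          (fun s f => PySem.Set.add s f) fs,
        nl ++ layer.flatMap (fun p => pvExp p.1 p.2)) := by
  induction layer with
  | nil => intro fs nl; simp
  | cons p t ih =>
    intro fs nl
    rw [List.foldl_cons, pvExtend_eq, ih]
    simp only [List.flatMap_cons, List.map_append, List.foldl_append, List.append_assoc]

-- combinations annotated with the suffix of still-usable vertices
def pvCT (xs : List Int) (r : Nat) : List (List Int × List Int) :=
  match r, xs with
  | 0, _ => [([], xs)]
  | _ + 1, [] => []
  | r' + 1, x :: rest =>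
      (pvCT rest r').map (fun p => (x :: p.1, p.2)) ++ pvCT rest (r' + 1)

theorem pvCT_fst (xs : List Int) : ∀ (r : Nat), (pvCT xs r).map Prod.fst = pvCombos xs r := by
  induction xs with
  | nil => intro r; cases r <;> simp [pvCT, pvCombos]
  | cons x t ih =>
    intro r
    cases r with
    | zero => simp [pvCT, pvCombos]
    | succ r' =>
      simp only [pvCT, pvCombos, List.map_append, List.map_map, ← ih]
      rfl

theorem pvCT_nil_of_lt (xs : List Int) : ∀ (r : Nat), xs.length < r → pvCT xs r = [] := by
  induction xs with
  | nil => intro r h; cases r with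
    | zero => simp at h
    | succ r' => rfl
  | cons x t ih =>
    intro r h
    cases r with
    | zero => simp at h
    | succ r' =>
      have h1 : t.length < r' := by simpa using h
      have h2 : t.length < r' + 1 := by omega
      simp [pvCT, ih r' h1, ih (r' + 1) h2]

theorem pvCombos_nil_of_lt (xs : List Int) (r : Nat) (h : xs.length < r) : pvCombos xs r = [] := by
  rw [← pvCT_fst, pvCT_nil_of_lt xs r h]; rfl

theorem pvExp_eq_CT (ys : List Int) : ∀ (f : List Int),
    pvExp f ys = (pvCT ys 1).map (fun p => (f ++ p.1, p.2)) := by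
  induction ys with
  | nil => intro f; rfl
  | cons y u ih =>
    intro f
    simp only [pvExp, ih, pvCT, List.map_append, List.map_cons, List.map_nil]
    rfl

theorem pvExp_nil (ys : List Int) : pvExp [] ys = pvCT ys 1 := by
  rw [pvExp_eq_CT]; simp

-- one breadth-first pass turns the annotated r-combos into the annotated (r+1)-combos
theorem pvCT_step (xs : List Int) : ∀ (r : Nat),
    (pvCT xs r).flatMap (fun p => pvExp p.1 p.2) = pvCT xs (r + 1) := by
  induction xs with
  | nil =>
    intro r
    cases r with
    | zero => rfl
    | succ r' => rfl
  | cons x t ih =>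
    intro r
    cases r with
    | zero =>
      show pvExp [] (x :: t) ++ [] = pvCT (x :: t) 1
      rw [List.append_nil, pvExp_nil]
    | succ r' =>
      show ((pvCT t r').map (fun p => (x :: p.1, p.2)) ++ pvCT t (r' + 1)).flatMap
          (fun p => pvExp p.1 p.2) = pvCT (x :: t) (r' + 2)
      rw [List.flatMap_append, pvFlatMapMap]
      have hface : ∀ p ∈ pvCT t r', pvExp (x :: p.1) p.2
          = (pvExp p.1 p.2).map (fun q => (x :: q.1, q.2)) := by
        intro p _
        induction p.2 with
        | nil => rfl
        | cons y u ihy => simp [pvExp, ihy]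
      rw [pvFlatMapCongr _ _ _ hface]
      have : (pvCT t r').flatMap (fun p => (pvExp p.1 p.2).map (fun q => (x :: q.1, q.2)))
          = ((pvCT t r').flatMap (fun p => pvExp p.1 p.2)).map (fun q => (x :: q.1, q.2)) := by
        simp [List.map_flatMap]
      rw [this, ih r', ih (r' + 1)]
      rfl

theorem pvCT_ne_nil (xs : List Int) : ∀ (r : Nat), r ≤ xs.length → pvCT xs r ≠ [] := by
  induction xs with
  | nil =>
    intro r h
    have hr : r = 0 := by simpa using h
    subst hr; simp [pvCT]
  | cons x t ih =>
    intro r h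
    cases r with
    | zero => simp [pvCT]
    | succ r' =>
      have h1 : r' ≤ t.length := by simpa using h
      simp only [pvCT, ne_eq, List.append_eq_nil_iff, List.map_eq_nil_iff, not_and]
      intro hnil
      exact absurd hnil (ih r' h1)

-- the whole loop, run from the annotated r-combos layer
theorem pvLoop_eq (xs : List Int) : ∀ (fuel r : Nat) (fs : List (List Int)),
    xs.length + 2 ≤ fuel + r →
    pvLoop fuel (pvCT xs r) fs =
      ((List.range' r (xs.length + 1 - r)).flatMap (fun j => pvCombos xs (j + 1))).foldl
        (fun s face => PySem.Set.add s face) fs := by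
  intro fuel
  induction fuel with
  | zero =>
    intro r fs h
    have hz : xs.length + 1 - r = 0 := by omega
    simp [pvLoop, hz]
  | succ fuel ih =>
    intro r fs h
    by_cases hlay : pvCT xs r = []
    · have hr : xs.length < r := by
        by_contra hc
        exact pvCT_ne_nil xs r (by omega) hlay
      have hz : xs.length + 1 - r = 0 := by omega
      simp [pvLoop, hlay, hz]
    · have hr : r ≤ xs.length := by
        by_contra hc
        exact hlay (pvCT_nil_of_lt xs r (by omega))
      rw [pvLoop, if_neg hlay]
      show pvLoop fuel (pvLayerStep (pvCT xs r) fs).2 (pvLayerStep (pvCT xs r) fs).1 = _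
      unfold pvLayerStep
      rw [pvLayerStep_eq, pvCT_step, pvCT_fst]
      dsimp only
      rw [List.nil_append, ih (r + 1) _ (by omega)]
      have hrange : List.range' r (xs.length + 1 - r)
          = r :: List.range' (r + 1) (xs.length - r) := by
        have hn : xs.length + 1 - r = (xs.length - r) + 1 := by omega
        rw [hn, List.range'_succ]
      rw [hrange, List.flatMap_cons, List.foldl_append]
      have : xs.length + 1 - (r + 1) = xs.length - r := by omega
      rw [this]

-- each simplex contributes the same face sequence in both ports
theorem per_simplex (fs : List (List Int)) (xs : List Int) :
    pvLoop (xs.length + 2) [([], xs)] fs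
      = (power_set_bar_empty xs).foldl (fun s face => PySem.Set.add s face) fs := by
  have h0 : pvCT xs 0 = [([], xs)] := by cases xs <;> rfl
  rw [← h0, pvLoop_eq xs (xs.length + 2) 0 fs (by omega), aFaces]
  have hsplit : List.range' 0 (xs.length + 1) = List.range' 0 xs.length ++ [xs.length] := by
    simpa using List.range'_concat (s := 0) (n := xs.length) (step := 1)
  rw [show xs.length + 1 - 0 = xs.length + 1 from rfl, hsplit, List.flatMap_append,
    List.flatMap_cons, pvCombos_nil_of_lt xs (xs.length + 1) (by omega)]
  rw [← List.range_eq_range']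
  simp

-- ===== VERDICT (by name: the statement is the Claim_ definition above) =====
theorem all_faces_from_d_simplices_spec : Claim_equal_all_faces_from_d_simplices := by
  intro simplices _ _
  unfold Spec_all_faces_from_d_simplices all_faces_from_d_simplices_alt all_faces_from_d_simplices
  refine congrArg (fun f => List.foldl f ([] : List (List Int)) simplices) ?_
  funext fs sx
  exact (per_simplex fs sx).symm
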